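-- pv_equiv track=rewrite | github.com/devdhark/Sample_Problems_Python-Coderbyte- | swap2.py | SwapII
-- ===== SOURCE A (Python) =====
-- def SwapII(str):
--     # code goes here
--     # first swap characters of all the characters in the string
--     # and store them in a list
--     str = list(str.swapcase())
--     for i, c in enumerate(str):
--         if c.isdigit():
--             # iterate through the remaining characters to find number pair(c,d)
--             for j, d in enumerate(str[i+1:]):
--                 if d.isdigit():
--                     # create substring where we can check our conditions
--                     temp = "".join(str[i+1: i+1+j])
--                     # swap if all characeter are non-space AND at least one character is an alphabet
--                     if all([not e.isspace() for e in temp]) and any([f.isalpha() for f in temp]):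
--                         str[i], str[i+1+j] = str[i+1+j], str[i]
--     str = "".join(str)
--     return str
-- ===== SOURCE B (Python) =====
-- def SwapII(str):
--     # Single forward scan per digit with a running has-alpha flag and an
--     # early break on whitespace instead of rebuilding the between-substring
--     # and re-scanning all of it for every digit pair.
--     s = list(str.swapcase())
--     n = len(s)
--     i = 0
--     while i < n:
--         if s[i].isdigit():
--             has_alpha = False
--             j = i + 1
--             while j < n:
--                 d = s[j]
--                 if d.isdigit():
--                     if has_alpha:
--                         s[i], s[j] = d, s[i]
--                 elif d.isalpha():
--                     has_alpha = True
--                 elif d.isspace():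
--                     break
--                 j += 1
--         i += 1
--     return "".join(s)
-- ===== Notes on version B (the rewrite author's own statement) =====
-- stated objective: alternative
-- what changed: B replaces A's inner rebuild of the between-substring (with fresh whole-substring all/any scans for every digit pair) by a single forward scan per digit position that carries a running has-alpha flag and breaks at the first whitespace, so the swap condition is O(1) per candidate.
import Mathlib
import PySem

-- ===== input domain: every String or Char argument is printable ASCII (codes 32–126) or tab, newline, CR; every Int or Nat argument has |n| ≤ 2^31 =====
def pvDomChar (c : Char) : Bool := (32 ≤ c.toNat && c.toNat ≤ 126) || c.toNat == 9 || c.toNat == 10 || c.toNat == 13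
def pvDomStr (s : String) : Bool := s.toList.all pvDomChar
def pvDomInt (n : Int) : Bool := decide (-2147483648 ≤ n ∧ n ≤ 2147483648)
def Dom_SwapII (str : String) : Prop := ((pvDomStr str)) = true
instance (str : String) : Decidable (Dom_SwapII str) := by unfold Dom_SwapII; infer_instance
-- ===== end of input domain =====

-- B replaces A's rebuild-the-substring-and-scan-it inner check by a single
-- forward scan per digit with a running has-alpha flag and an early break on
-- whitespace (objective: alternative).

-- ===== PORT A =====

-- str.swapcase(): per-character case flip; exact on the ASCII domain
def pySwapcaseChar (c : Char) : Char :=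
  if PySem.Chars.isupper c then PySem.Chars.lowerChar c
  else if PySem.Chars.islower c then PySem.Chars.upperChar c
  else c

-- inner loop of A: `for j, d in enumerate(str[i+1:])` — the slice is taken once
-- (the list argument `rest`); j is the running offset; s is the live list.
def pvAInner (i : Nat) : Nat → List Char → List Char → List Char
  | _, [], s => s
  | j, d :: rest, s =>
    let s' :=
      if PySem.Chars.isdigit d then
        -- temp = "".join(str[i+1 : i+1+j]) from the live list (nonnegative in-range slice = drop/take)
        let temp := (s.drop (i+1)).take j
        if temp.all (fun e => !PySem.Chars.isspace e) && temp.any (fun f => PySem.Chars.isalpha f) then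
          let a := s.getD i ' '          -- str[i], index always in range here
          let b := s.getD (i+1+j) ' '    -- str[i+1+j], index always in range here
          (s.set i b).set (i+1+j) a      -- simultaneous swap str[i], str[i+1+j] = str[i+1+j], str[i]
        else s
      else s
    pvAInner i (j+1) rest s'

-- outer loop of A: `for i, c in enumerate(str)` — c is read from the live list
def pvAOuter (n : Nat) (i : Nat) (s : List Char) : List Char :=
  if h : i < n then
    let c := s.getD i ' '
    let s' := if PySem.Chars.isdigit c then pvAInner i 0 (s.drop (i+1)) s else s
    pvAOuter n (i+1) s'
  else s
termination_by n - i

def SwapII (str : String) : String :=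
  let s := str.toList.map pySwapcaseChar   -- list(str.swapcase())
  String.ofList (pvAOuter s.length 0 s)    -- "".join(str)

-- ===== PORT B =====

-- inner while-loop of B: running hasAlpha flag, early exit on whitespace
def pvBInner (n i : Nat) (j : Nat) (hasAlpha : Bool) (s : List Char) : List Char :=
  if _h : j < n then
    let d := s.getD j ' '                  -- s[j], index in range
    if PySem.Chars.isdigit d then
      let s' := if hasAlpha then (s.set i d).set j (s.getD i ' ') else s
      pvBInner n i (j+1) hasAlpha s'
    else if PySem.Chars.isalpha d then pvBInner n i (j+1) true s
    else if PySem.Chars.isspace d then s   -- break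
    else pvBInner n i (j+1) hasAlpha s
  else s
termination_by n - j

-- outer while-loop of B
def pvBOuter (n : Nat) (i : Nat) (s : List Char) : List Char :=
  if _h : i < n then
    let s' := if PySem.Chars.isdigit (s.getD i ' ') then pvBInner n i (i+1) false s else s
    pvBOuter n (i+1) s'
  else s
termination_by n - i

def SwapII_alt (str : String) : String :=
  let s := str.toList.map pySwapcaseChar   -- list(str.swapcase())
  String.ofList (pvBOuter s.length 0 s)

-- ===== PRECONDITION & SPEC =====
def Spec_SwapII (str : String) (out : String) : Prop := out = SwapII_alt str
instance (str : String) (out : String) : Decidable (Spec_SwapII str out) := by unfold Spec_SwapII; infer_instance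

-- ===== CLAIM (what is proved, stated in full; the proofs are below) =====
def Claim_equal_SwapII : Prop := ∀ (str : String), Dom_SwapII str → Spec_SwapII str (SwapII str)

-- ===== LEMMAS AND PROOFS =====

-- the character class (isdigit, isalpha, isspace) — all that A's swap condition inspects
def pvCls (c : Char) : Bool × Bool × Bool :=
  (PySem.Chars.isdigit c, PySem.Chars.isalpha c, PySem.Chars.isspace c)

theorem pvChar_class {c : Char} :
    (PySem.Chars.isdigit c = true → PySem.Chars.isalpha c = false ∧ PySem.Chars.isspace c = false) ∧
    (PySem.Chars.isalpha c = true → PySem.Chars.isspace c = false) := by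
  have h0 : '0'.val.toNat = 48 := rfl
  have h9 : '9'.val.toNat = 57 := rfl
  have hA : 'A'.val.toNat = 65 := rfl
  have hZ : 'Z'.val.toNat = 90 := rfl
  have ha : 'a'.val.toNat = 97 := rfl
  have hz : 'z'.val.toNat = 122 := rfl
  simp only [PySem.Chars.isdigit, PySem.Chars.isalpha, PySem.Chars.isupper, PySem.Chars.islower,
    PySem.Chars.isspace, Char.le_def, UInt32.le_iff_toNat_le, Char.toNat, decide_eq_true_eq,
    Bool.and_eq_true, Bool.or_eq_false_iff, Bool.and_eq_false_iff,
    decide_eq_false_iff_not, not_le, Bool.or_eq_true, h0, h9, hA, hZ, ha, hz]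
  omega

theorem pvCls_digit {c : Char} (h : PySem.Chars.isdigit c = true) :
    pvCls c = (true, false, false) := by
  obtain ⟨h1, h2⟩ := pvChar_class.1 h
  simp [pvCls, h, h1, h2]

theorem pvGetD_set_ne {l : List Char} {n p : Nat} (v d : Char) (h : p ≠ n) :
    (l.set n v).getD p d = l.getD p d := by
  simp [List.getD_eq_getElem?_getD, List.getElem?_set_ne h.symm]

theorem pvGetD_set_self {l : List Char} {n : Nat} (v d : Char) (h : n < l.length) :
    (l.set n v).getD n d = v := by
  simp [List.getD_eq_getElem?_getD, h]

theorem pvAll_space_of_map_cls {xs ys : List Char} (h : xs.map pvCls = ys.map pvCls) :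
    xs.all (fun e => !PySem.Chars.isspace e) = ys.all (fun e => !PySem.Chars.isspace e) := by
  rw [show (fun e => !PySem.Chars.isspace e) = (fun t : Bool × Bool × Bool => !t.2.2) ∘ pvCls from rfl,
    ← List.all_map, h, List.all_map]

theorem pvAny_alpha_of_map_cls {xs ys : List Char} (h : xs.map pvCls = ys.map pvCls) :
    xs.any (fun f => PySem.Chars.isalpha f) = ys.any (fun f => PySem.Chars.isalpha f) := by
  rw [show (fun f => PySem.Chars.isalpha f) = (fun t : Bool × Bool × Bool => t.2.1) ∘ pvCls from rfl,
    ← List.any_map, h, List.any_map]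

-- once a space sits strictly between position i and every later candidate, A's inner loop is a no-op
theorem innerA_noop (i q : Nat) :
    ∀ (rest : List Char) (j : Nat) (s : List Char), q < j → i+1+q < s.length →
      PySem.Chars.isspace (s.getD (i+1+q) ' ') = true →
      pvAInner i j rest s = s := by
  intro rest
  induction rest with
  | nil => intro j s _ _ _; rfl
  | cons d rest ih =>
    intro j s hqj hql hsp
    have hcond : ((s.drop (i+1)).take j).all (fun e => !PySem.Chars.isspace e) = false := by
      by_contra hall
      rw [Bool.not_eq_false, List.all_eq_true] at hall
      have hq1 : q < ((s.drop (i+1)).take j).length := by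
        simp only [List.length_take, List.length_drop]; omega
      have hmem := List.getElem_mem hq1
      have he : ((s.drop (i+1)).take j)[q]'hq1 = s[i+1+q]'hql := by
        rw [List.getElem_take, List.getElem_drop]
      have := hall _ hmem
      rw [he] at this
      rw [List.getD_eq_getElem _ _ hql] at hsp
      simp [hsp] at this
    simp only [pvAInner, hcond, Bool.false_and, Bool.false_eq_true, if_false, ite_self]
    exact ih (j+1) s (by omega) hql hsp

theorem length_innerA (i : Nat) :
    ∀ (rest : List Char) (j : Nat) (s : List Char),
      (pvAInner i j rest s).length = s.length := by
  intro rest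
  induction rest with
  | nil => intro j s; rfl
  | cons d rest ih =>
    intro j s
    simp only [pvAInner]
    rw [ih]
    split_ifs <;> simp

theorem pvTake_succ_drop {s : List Char} {i j : Nat} (h : i+1+j < s.length) :
    (s.drop (i+1)).take (j+1) = (s.drop (i+1)).take j ++ [s.getD (i+1+j) ' '] := by
  have hj : j < (s.drop (i+1)).length := by simp only [List.length_drop]; omega
  rw [List.take_succ_eq_append_getElem hj]
  congr 1
  rw [List.getElem_drop, List.getD_eq_getElem _ _ (by omega : i+1+j < s.length)]

-- the window str[i+1 : i+1+j] is untouched by the swap at positions i and i+1+j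
theorem pvWindow_set (i j : Nat) (s : List Char) (a b : Char) :
    (((s.set i b).set (i+1+j) a).drop (i+1)).take j = (s.drop (i+1)).take j := by
  apply List.ext_getElem
  · simp
  · intro q h1 h2
    have hq : q < j := by simp only [List.length_take, List.length_drop, List.length_set, lt_min_iff] at h1; omega
    simp only [List.getElem_take, List.getElem_drop]
    rw [List.getElem_set_ne (by omega), List.getElem_set_ne (by omega)]

theorem inner_eq (i : Nat) (s₀ : List Char) :
    ∀ (rest : List Char) (j : Nat) (s : List Char) (ha : Bool),
      rest = (s₀.drop (i+1)).drop j →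
      s.length = s₀.length →
      (∀ p, i+1+j ≤ p → s.getD p ' ' = s₀.getD p ' ') →
      ((s.drop (i+1)).take j).map pvCls = ((s₀.drop (i+1)).take j).map pvCls →
      PySem.Chars.isdigit (s.getD i ' ') = true →
      ha = ((s₀.drop (i+1)).take j).any (fun f => PySem.Chars.isalpha f) →
      ((s₀.drop (i+1)).take j).all (fun e => !PySem.Chars.isspace e) = true →
      pvAInner i j rest s = pvBInner s₀.length i (i+1+j) ha s := by
  intro rest
  induction rest with
  | nil =>
    intro j s ha hrest hlen hhi hmid hi hha hns
    have h1 := congrArg List.length hrest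
    simp only [List.length_nil, List.length_drop] at h1
    show pvAInner i j [] s = _
    rw [pvBInner, dif_neg (by omega)]
    rfl
  | cons d rest' ih =>
    intro j s ha hrest hlen hhi hmid hi hha hns
    have hdc : (s₀.drop (i+1)).drop j = d :: rest' := hrest.symm
    have hlen1 := congrArg List.length hdc
    simp only [List.length_drop, List.length_cons] at hlen1
    have hm : i+1+j < s₀.length := by omega
    have hjlt : j < (s₀.drop (i+1)).length := by simp only [List.length_drop]; omega
    have hd0 : (s₀.drop (i+1))[j]'hjlt = d := by
      have h0 : ((s₀.drop (i+1)).drop j)[0]'(by rw [hdc]; simp) = d := by simp [hdc]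
      rw [List.getElem_drop] at h0; simpa using h0
    have hs0d : s₀.getD (i+1+j) ' ' = d := by
      rw [List.getD_eq_getElem _ _ hm, ← hd0, List.getElem_drop]
    have hcur : s.getD (i+1+j) ' ' = d := by rw [hhi _ le_rfl]; exact hs0d
    have hrest2 : rest' = (s₀.drop (i+1)).drop (j+1) := by
      rw [List.drop_add_one_eq_tail_drop, hdc]; rfl
    have htake : (s₀.drop (i+1)).take (j+1) = (s₀.drop (i+1)).take j ++ [d] := by
      rw [pvTake_succ_drop hm, hs0d]
    have hmlen : i+1+j < s.length := by omega
    rw [pvBInner, dif_pos hm]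
    simp only [pvAInner, hcur]
    by_cases hdig : PySem.Chars.isdigit d = true
    · obtain ⟨hda, hds⟩ := (pvChar_class (c := d)).1 hdig
      have hallA : ((s.drop (i+1)).take j).all (fun e => !PySem.Chars.isspace e) = true := by
        rw [pvAll_space_of_map_cls hmid]; exact hns
      have hanyA : ((s.drop (i+1)).take j).any (fun f => PySem.Chars.isalpha f) = ha := by
        rw [pvAny_alpha_of_map_cls hmid]; exact hha.symm
      have hha' : ha = ((s₀.drop (i+1)).take (j+1)).any (fun f => PySem.Chars.isalpha f) := by
        rw [htake]; simp [List.any_append, hda]; exact hha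
      have hns' : ((s₀.drop (i+1)).take (j+1)).all (fun e => !PySem.Chars.isspace e) = true := by
        rw [htake]; simp [List.all_append, hds, hns]
      simp only [hdig, if_true, hallA, hanyA, Bool.true_and]
      cases ha with
      | false =>
        simp only [Bool.false_eq_true, if_false]
        refine ih (j+1) s false hrest2 hlen (fun p hp => hhi p (by omega)) ?_ hi hha' hns'
        rw [pvTake_succ_drop hmlen, hcur, htake, List.map_append, List.map_append, hmid]
      | true =>
        simp only [if_true]
        refine ih (j+1) _ true hrest2 (by simp [hlen]) ?_ ?_ ?_ hha' hns'
        · intro p hp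
          rw [pvGetD_set_ne _ _ (by omega), pvGetD_set_ne _ _ (by omega)]
          exact hhi p (by omega)
        · rw [pvTake_succ_drop (by simp [hlen]; omega), pvWindow_set, htake,
            List.map_append, List.map_append, hmid]
          have he : (((s.set i d).set (i+1+j) (s.getD i ' ')).getD (i+1+j) ' ') = s.getD i ' ' :=
            pvGetD_set_self _ _ (by simp; omega)
          rw [he]
          simp only [List.map_cons, List.map_nil, pvCls_digit hi, pvCls_digit hdig]
        · rw [pvGetD_set_ne _ _ (by omega), pvGetD_set_self _ _ (by omega)]
          exact hdig
    · simp only [hdig]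
      by_cases halp : PySem.Chars.isalpha d = true
      · have hds : PySem.Chars.isspace d = false := (pvChar_class (c := d)).2 halp
        simp only [halp, if_true]
        refine ih (j+1) s true hrest2 hlen (fun p hp => hhi p (by omega)) ?_ hi ?_ ?_
        · rw [pvTake_succ_drop hmlen, hcur, htake, List.map_append, List.map_append, hmid]
        · rw [htake]; simp [List.any_append, halp]
        · rw [htake]; simp [List.all_append, hds, hns]
      · simp only [halp]
        by_cases hsp : PySem.Chars.isspace d = true
        · simp only [hsp, if_true]
          exact innerA_noop i j rest' (j+1) s (by omega) hmlen (by rw [hcur]; exact hsp)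
        · simp only [hsp]
          refine ih (j+1) s ha hrest2 hlen (fun p hp => hhi p (by omega)) ?_ hi ?_ ?_
          · rw [pvTake_succ_drop hmlen, hcur, htake, List.map_append, List.map_append, hmid]
          · have halpf : PySem.Chars.isalpha d = false := by simpa using halp
            rw [htake]; simp [List.any_append, halpf]; exact hha
          · have hspf : PySem.Chars.isspace d = false := by simpa using hsp
            rw [htake]; simp [List.all_append, hspf, hns]

theorem outer_eq (n : Nat) :
    ∀ (k : Nat) (s : List Char), n = s.length →
      pvAOuter n k s = pvBOuter n k s := by
  suffices H : ∀ (m k : Nat) (s : List Char), n - k ≤ m → n = s.length →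
      pvAOuter n k s = pvBOuter n k s by
    intro k s h; exact H (n - k) k s le_rfl h
  intro m
  induction m with
  | zero =>
    intro k s hm h
    rw [pvAOuter, dif_neg (by omega), pvBOuter, dif_neg (by omega)]
  | succ m ih =>
    intro k s hm h
    by_cases hkn : k < n
    · rw [pvAOuter, dif_pos hkn, pvBOuter, dif_pos hkn]
      by_cases hd : PySem.Chars.isdigit (s.getD k ' ') = true
      · simp only [hd, if_true]
        have he := inner_eq k s (s.drop (k+1)) 0 s false (List.drop_zero).symm rfl
          (fun p _ => rfl) rfl hd rfl rfl
        rw [show k+1+0 = k+1 from rfl, ← h] at he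
        rw [he]
        refine ih (k+1) _ (by omega) ?_
        rw [← he, length_innerA]; exact h
      · simp only [hd]
        exact ih (k+1) s (by omega) h
    · rw [pvAOuter, dif_neg hkn, pvBOuter, dif_neg hkn]

-- ===== VERDICT (by name: the statement is the Claim_ definition above) =====
theorem SwapII_spec : Claim_equal_SwapII := by
  intro str _
  unfold Spec_SwapII SwapII SwapII_alt
  exact congrArg String.ofList (outer_eq _ 0 _ (by simp))
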